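-- pv_equiv track=rewrite | github.com/wan-catherine/Leetcode | problems/N650_2_Keys_Keyboard.py | minSteps_dp
-- ===== SOURCE A (Python) =====
-- def minSteps_dp(n):
--     """
--     :type n: int
--     :rtype: int
--     """
--     dp = [n] * (n+1)
--     dp[1] = 0
--     for i in range(2, n+1):
--         for j in range(2, i+1):
--             if i % j:
--                 continue
--             k = i // j
--             dp[i] = min(dp[i], dp[k] + 1 + j - 1)
--             break
--     return dp[-1]
-- ===== SOURCE B (Python) =====
-- def minSteps_dp(n):
--     # sum of prime factors of n by trial division (O(sqrt n) vs A's O(n*sqrt n) DP)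
--     total = 0
--     m = n
--     d = 2
--     while d * d <= m:
--         if m % d == 0:
--             total += d
--             m //= d
--         else:
--             d += 1
--     if m > 1:
--         total += m
--     return total
-- ===== Notes on version B (the rewrite author's own statement) =====
-- stated objective: faster
-- what changed: Replaces the O(n*sqrt n) DP table (dp[i] = dp[i/p] + p over all i up to n) by direct trial-division factorization of n, summing its prime factors in O(sqrt n) with O(1) space.
-- outside the precondition, e.g. on minSteps_dp(0): A raises IndexError, B returns 0
import Mathlib
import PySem

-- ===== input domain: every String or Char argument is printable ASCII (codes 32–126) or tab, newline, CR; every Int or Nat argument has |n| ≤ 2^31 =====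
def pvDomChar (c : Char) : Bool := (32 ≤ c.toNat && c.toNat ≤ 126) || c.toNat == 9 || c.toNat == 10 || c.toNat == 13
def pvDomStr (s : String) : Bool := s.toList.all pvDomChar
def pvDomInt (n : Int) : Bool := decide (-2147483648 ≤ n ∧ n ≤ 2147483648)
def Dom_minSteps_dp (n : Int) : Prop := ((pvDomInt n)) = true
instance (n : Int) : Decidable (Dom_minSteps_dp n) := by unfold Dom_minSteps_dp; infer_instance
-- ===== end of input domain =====

-- B replaces A's O(n·√n) DP table by trial-division factorization of n (sum of prime factors), O(√n), O(1) space.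

-- ===== PORT A =====
-- inner 'for j in range(2, i+1)' loop: skip non-divisors, update dp[i] at the first divisor and break
def pvInnerA (i : Int) (dp : List Int) : List Int → List Int
  | [] => dp
  | j :: rest =>
    if PySem.Int.mod i j ≠ 0 then pvInnerA i dp rest
    else
      let k := PySem.Int.floordiv i j
      PySem.List.pySetD dp i (min (PySem.List.pyGetD dp i 0) (PySem.List.pyGetD dp k 0 + 1 + j - 1))

def minSteps_dp (n : Int) : Int :=
  let dp := List.replicate (n + 1).toNat n
  let dp := PySem.List.pySetD dp 1 0
  let dp := (PySem.List.pyRange 2 (n + 1) 1).foldl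
      (fun dp i => pvInnerA i dp (PySem.List.pyRange 2 (i + 1) 1)) dp
  PySem.List.pyGetD dp (-1) 0

-- ===== PORT B =====
-- the 'while d*d <= m' trial-division loop of Source B; the '2 ≤ d' conjunct only serves
-- termination (d starts at 2 and never decreases)
def pvAltGo (total m d : Int) : Int :=
  if h : 2 ≤ d ∧ d * d ≤ m then
    if PySem.Int.mod m d = 0 then pvAltGo (total + d) (PySem.Int.floordiv m d) d
    else pvAltGo total m (d + 1)
  else
    if 1 < m then total + m else total
termination_by (m.toNat, (m - d).toNat)
decreasing_by
  · obtain ⟨hd, hm⟩ := h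
    have h2d : 2 * d ≤ d * d := by nlinarith
    have hm4 : 4 ≤ m := by nlinarith
    have heq := PySem.Int.floordiv_eq_ediv_of_pos (a := m) (b := d) (by omega)
    have hge : 0 ≤ m / d := Int.ediv_nonneg (by omega) (by omega)
    have hsplit := Int.ediv_add_emod m d
    have hr : 0 ≤ m % d := Int.emod_nonneg m (by omega)
    have hqd : 2 * (m / d) ≤ d * (m / d) := by nlinarith
    have hlt : m / d < m := by nlinarith
    left; omega
  · obtain ⟨hd, hm⟩ := h
    have h2d : 2 * d ≤ d * d := by nlinarith
    omega

def minSteps_dp_alt (n : Int) : Int := pvAltGo 0 n 2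

-- ===== PRECONDITION & SPEC =====
-- Pre_ excludes n ≤ 0, where A raises IndexError on 'dp[1] = 0'
def Pre_minSteps_dp (n : Int) : Prop := 1 ≤ n
instance (n : Int) : Decidable (Pre_minSteps_dp n) := by unfold Pre_minSteps_dp; infer_instance
def pvWitness_minSteps_dp : Int := 6

def Spec_minSteps_dp (n : Int) (out : Int) : Prop := out = minSteps_dp_alt n
instance (n : Int) (out : Int) : Decidable (Spec_minSteps_dp n out) := by unfold Spec_minSteps_dp; infer_instance

-- ===== CLAIM (what is proved, stated in full; the proofs are below) =====
def Claim_equal_minSteps_dp : Prop := ∀ (n : Int), Dom_minSteps_dp n → Pre_minSteps_dp n → Spec_minSteps_dp n (minSteps_dp n)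

-- ===== LEMMAS AND PROOFS =====

def sumPF (m : Nat) : Nat :=
  if _h : 2 ≤ m then m.minFac + sumPF (m / m.minFac) else 0
termination_by m
decreasing_by
  exact Nat.div_lt_self (by omega) (Nat.minFac_prime (by omega)).two_le

theorem sumPF_lt : sumPF 0 = 0 ∧ sumPF 1 = 0 := by
  constructor <;> (rw [sumPF]; norm_num)

theorem sumPF_le (m : Nat) : sumPF m ≤ m := by
  induction m using sumPF.induct with
  | case2 m h => rw [sumPF]; simp [h]
  | case1 m h ih =>
    rw [sumPF, dif_pos h]
    have hp := (Nat.minFac_prime (n := m) (show m ≠ 1 by omega)).two_le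
    have hd : m.minFac ∣ m := Nat.minFac_dvd m
    have hdiv : m / m.minFac * m.minFac = m := Nat.div_mul_cancel hd
    by_cases hq : m / m.minFac = 1
    · rw [hq] at hdiv ⊢
      have : sumPF 1 = 0 := sumPF_lt.2
      omega
    · have hq0 : m / m.minFac ≠ 0 := by
        intro h0; rw [h0] at hdiv; omega
      have hq2 : 2 ≤ m / m.minFac := by omega
      nlinarith [ih]

theorem pvAltGo_eq : ∀ (total m d : Int), 1 ≤ m → 2 ≤ d →
    (∀ e : Int, 2 ≤ e → e < d → ¬ e ∣ m) →
    pvAltGo total m d = total + (sumPF m.toNat : Int) := by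
  intro total m d
  induction total, m, d using pvAltGo.induct with
  | case1 total m d h hmod ih =>
    intro hm hd hnd
    obtain ⟨hd2, hdd⟩ := h
    have h2d : 2 * d ≤ d * d := by nlinarith
    have hmd : d ≤ m := by omega
    have hdvd : d ∣ m := (PySem.Int.mod_eq_zero_iff_dvd m d).mp hmod
    -- cast to Nat
    have hmN : (m.toNat : Int) = m := Int.toNat_of_nonneg (by omega)
    have hdN : (d.toNat : Int) = d := Int.toNat_of_nonneg (by omega)
    have hdvdN : d.toNat ∣ m.toNat := by
      rw [← Int.natCast_dvd_natCast, hmN, hdN]; exact hdvd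
    have hq : PySem.Int.floordiv m d = ((m.toNat / d.toNat : Nat) : Int) := by
      rw [← hmN, ← hdN, PySem.Int.floordiv_natCast]; simp
    have hminfac : m.toNat.minFac = d.toNat := by
      have hle : m.toNat.minFac ≤ d.toNat :=
        Nat.minFac_le_of_dvd (by omega) hdvdN
      rcases Nat.lt_or_ge m.toNat.minFac d.toNat with hlt | hge
      · exfalso
        have hp2 : 2 ≤ m.toNat.minFac :=
          (Nat.minFac_prime (n := m.toNat) (by omega)).two_le
        refine hnd (m.toNat.minFac : Int) (by exact_mod_cast hp2) ?_ ?_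
        · rw [← hdN]; exact_mod_cast hlt
        · rw [← hmN]; exact_mod_cast Nat.minFac_dvd m.toNat
      · omega
    have hq1 : 1 ≤ m.toNat / d.toNat := (Nat.one_le_div_iff (by omega)).mpr (by omega)
    have hinv : ∀ e : Int, 2 ≤ e → e < d → ¬ e ∣ PySem.Int.floordiv m d := by
      intro e he2 hed hediv
      have hqm : PySem.Int.floordiv m d ∣ m := by
        rw [hq, ← hmN]; exact_mod_cast Nat.div_dvd_of_dvd hdvdN
      exact hnd e he2 hed (hediv.trans hqm)
    rw [pvAltGo, dif_pos ⟨hd2, hdd⟩, if_pos hmod,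
      ih (by rw [hq]; exact_mod_cast hq1) hd2 hinv, hq]
    · have hrec : sumPF m.toNat = m.toNat.minFac + sumPF (m.toNat / m.toNat.minFac) := by
        rw [sumPF, dif_pos (by omega)]
      rw [hrec, hminfac, Int.toNat_natCast]
      push_cast
      rw [hdN]
      ring
  | case2 total m d h hmod ih =>
    intro hm hd hnd
    rw [pvAltGo, dif_pos h, if_neg hmod]
    refine ih hm (by omega) ?_
    intro e he2 hed hediv
    rcases Int.lt_or_lt_of_ne (a := e) (b := d) (by rintro rfl; exact hmod ((PySem.Int.mod_eq_zero_iff_dvd m e).mpr hediv)) with h' | h'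
    · exact hnd e he2 h' hediv
    · omega
  | case3 total m d h h1 =>
    intro hm hd hnd
    rw [pvAltGo, dif_neg h, if_pos h1]
    have hdd : m < d * d := by
      rcases not_and_or.mp h with h' | h' <;> omega
    have hmN : (m.toNat : Int) = m := Int.toNat_of_nonneg (by omega)
    have hdN : (d.toNat : Int) = d := Int.toNat_of_nonneg (by omega)
    have hprime : m.toNat.Prime := by
      by_contra hnp
      have hsq : m.toNat.minFac * m.toNat.minFac ≤ m.toNat := by
        have := Nat.minFac_sq_le_self (n := m.toNat) (by omega) hnp
        nlinarith [this]
      have hddN : m.toNat < d.toNat * d.toNat := by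
        have : ((d.toNat * d.toNat : Nat) : Int) = d * d := by push_cast [hdN]; ring
        omega
      have hp2 : 2 ≤ m.toNat.minFac :=
        (Nat.minFac_prime (n := m.toNat) (by omega)).two_le
      have hplt : m.toNat.minFac < d.toNat := by nlinarith
      refine hnd (m.toNat.minFac : Int) (by exact_mod_cast hp2) ?_ ?_
      · rw [← hdN]; exact_mod_cast hplt
      · rw [← hmN]; exact_mod_cast Nat.minFac_dvd m.toNat
    have hv : sumPF m.toNat = m.toNat := by
      rw [sumPF, dif_pos hprime.two_le, hprime.minFac_eq,
        Nat.div_self (by omega), sumPF_lt.2]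
      omega
    rw [hv, hmN]
  | case4 total m d h h1 =>
    intro hm hd hnd
    rw [pvAltGo, dif_neg h, if_neg h1]
    have : m.toNat = 1 := by omega
    rw [this, sumPF_lt.2]; omega

theorem alt_eq_sumPF (n : Int) (hn : 1 ≤ n) : minSteps_dp_alt n = (sumPF n.toNat : Int) := by
  have := pvAltGo_eq 0 n 2 hn (by omega) (by intro e he hed; omega)
  simpa [minSteps_dp_alt] using this

-- at a first divisor c of i (no smaller one), c is the least prime factor of i
theorem minFac_of_div (i c : Int) (hi : 2 ≤ i) (hc : 2 ≤ c) (hdvd : c ∣ i)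
    (hnd : ∀ e : Int, 2 ≤ e → e < c → ¬ e ∣ i) : (i.toNat.minFac : Int) = c := by
  have hiN : (i.toNat : Int) = i := Int.toNat_of_nonneg (by omega)
  have hcN : (c.toNat : Int) = c := Int.toNat_of_nonneg (by omega)
  have hdvdN : c.toNat ∣ i.toNat := by
    rw [← Int.natCast_dvd_natCast, hiN, hcN]; exact hdvd
  have hle : i.toNat.minFac ≤ c.toNat := Nat.minFac_le_of_dvd (by omega) hdvdN
  rcases Nat.lt_or_ge i.toNat.minFac c.toNat with hlt | hge
  · exfalso
    have hp2 : 2 ≤ i.toNat.minFac :=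
      (Nat.minFac_prime (n := i.toNat) (by omega)).two_le
    refine hnd (i.toNat.minFac : Int) (by exact_mod_cast hp2) ?_ ?_
    · rw [← hcN]; exact_mod_cast hlt
    · rw [← hiN]; exact_mod_cast Nat.minFac_dvd i.toNat
  · omega

-- the inner for-j loop: scans j = c, c+1, …, i; at the first divisor (the least prime factor
-- of i, since no e < c divides i) it updates dp[i] and breaks
theorem pvInnerA_eq (i : Int) (hi : 2 ≤ i) : ∀ (fuel : Nat) (c : Int) (dp : List Int),
    (i - c).toNat ≤ fuel → 2 ≤ c → c ≤ i →
    (∀ e : Int, 2 ≤ e → e < c → ¬ e ∣ i) →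
    pvInnerA i dp (PySem.List.pyRange c (i + 1) 1) =
      PySem.List.pySetD dp i (min (PySem.List.pyGetD dp i 0)
        (PySem.List.pyGetD dp ((i.toNat / i.toNat.minFac : Nat) : Int) 0 + 1 + (i.toNat.minFac : Int) - 1)) := by
  intro fuel
  induction fuel with
  | zero =>
    intro c dp hf hc hci hnd
    have hceq : c = i := by omega
    subst hceq
    rw [PySem.List.pyRange_one_cons (by omega), pvInnerA]
    have hdvd : c ∣ c := dvd_rfl
    have hmod : PySem.Int.mod c c = 0 := (PySem.Int.mod_eq_zero_iff_dvd c c).mpr hdvd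
    rw [if_neg (by simp [hmod])]
    have hmf := minFac_of_div c c hi hc hdvd hnd
    have hcN : (c.toNat : Int) = c := Int.toNat_of_nonneg (by omega)
    have hfd : PySem.Int.floordiv c c = ((c.toNat / c.toNat.minFac : Nat) : Int) := by
      conv_lhs => rw [← hcN]
      rw [PySem.Int.floordiv_natCast]
      congr 2
      have h2 := congrArg Int.toNat hmf
      simp at h2
      exact h2.symm
    rw [hfd, hmf]
  | succ fuel ih =>
    intro c dp hf hc hci hnd
    rw [PySem.List.pyRange_one_cons (by omega), pvInnerA]
    by_cases hmod : PySem.Int.mod i c = 0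
    · rw [if_neg (by simp [hmod])]
      have hdvd : c ∣ i := (PySem.Int.mod_eq_zero_iff_dvd i c).mp hmod
      have hmf := minFac_of_div i c hi hc hdvd hnd
      have hiN : (i.toNat : Int) = i := Int.toNat_of_nonneg (by omega)
      have hcN : (c.toNat : Int) = c := Int.toNat_of_nonneg (by omega)
      have hfd : PySem.Int.floordiv i c = ((i.toNat / i.toNat.minFac : Nat) : Int) := by
        conv_lhs => rw [← hiN, ← hcN]
        rw [PySem.Int.floordiv_natCast]
        congr 2
        have h2 := congrArg Int.toNat hmf
        simp at h2
        exact h2.symm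
      rw [hfd, hmf]
    · rw [if_pos (by simp [hmod])]
      have hci' : c ≠ i := by
        rintro rfl
        exact hmod ((PySem.Int.mod_eq_zero_iff_dvd c c).mpr dvd_rfl)
      refine ih (c + 1) dp (by omega) (by omega) (by omega) ?_
      intro e he2 hed hediv
      rcases Int.lt_or_lt_of_ne (a := e) (b := c)
          (by rintro rfl; exact hmod ((PySem.Int.mod_eq_zero_iff_dvd _ _).mpr hediv)) with h' | h'
      · exact hnd e he2 h' hediv
      · omega

-- contents of A's dp table once the outer loop has processed i = 2 … b
def dpVal (n : Int) (b t : Nat) : Int :=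
  if t = 0 then n else if t ≤ b then (sumPF t : Int) else n

theorem outerA (n : Int) (hn : 1 ≤ n) : ∀ m : Nat, 1 + (m : Int) ≤ n →
    ((PySem.List.pyRange 2 ((1 + (m : Int)) + 1) 1).foldl
        (fun dp i => pvInnerA i dp (PySem.List.pyRange 2 (i + 1) 1))
        (PySem.List.pySetD (List.replicate (n + 1).toNat n) 1 0)).length = (n + 1).toNat ∧
    ∀ t : Nat, t < (n + 1).toNat →
      ((PySem.List.pyRange 2 ((1 + (m : Int)) + 1) 1).foldl
        (fun dp i => pvInnerA i dp (PySem.List.pyRange 2 (i + 1) 1))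
        (PySem.List.pySetD (List.replicate (n + 1).toNat n) 1 0)).getD t 0 = dpVal n (1 + m) t := by
  have hL : (n + 1).toNat = n.toNat + 1 := by omega
  intro m
  induction m with
  | zero =>
    intro hm
    rw [PySem.List.pyRange_one_eq_nil (by norm_num), List.foldl_nil]
    rw [PySem.List.pySetD_of_nonneg _ _ (by norm_num)]
    constructor
    · simp
    · intro t ht
      simp only [Int.toNat_one]
      rw [List.getD_eq_getElem?_getD, List.getElem?_set]
      have hrep : ∀ s : Nat, s < (n + 1).toNat →
          (List.replicate (n + 1).toNat n)[s]?.getD 0 = n := by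
        intro s hs
        rw [List.getElem?_replicate, if_pos hs]
        rfl
      by_cases h1 : t = 1
      · subst h1
        unfold dpVal
        split_ifs <;> simp_all [sumPF_lt.2]
      · rw [if_neg (by simpa using (fun h => h1 h.symm))]
        rw [hrep t ht]
        unfold dpVal
        split_ifs with h0 h2 <;> try rfl
        omega
  | succ m ih =>
    intro hm
    have hm' : 1 + (m : Int) ≤ n := by push_cast at hm ⊢; omega
    obtain ⟨ihlen, ihval⟩ := ih hm'
    have hsplit : ((1 + ((m + 1 : Nat) : Int)) + 1) = ((1 + (m : Int)) + 1) + 1 := by push_cast; ring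
    rw [hsplit, PySem.List.pyRange_one_succ_right (by omega), List.foldl_append, List.foldl_cons, List.foldl_nil]
    set dpm := (PySem.List.pyRange 2 ((1 + (m : Int)) + 1) 1).foldl
        (fun dp i => pvInnerA i dp (PySem.List.pyRange 2 (i + 1) 1))
        (PySem.List.pySetD (List.replicate (n + 1).toNat n) 1 0) with hdpm
    have hi : ((1 + (m : Int)) + 1) = ((m + 2 : Nat) : Int) := by push_cast; ring
    rw [hi]
    set j : Nat := m + 2 with hj
    have hjn : j ≤ n.toNat := by omega
    have hj2 : 2 ≤ j := by omega
    set p : Nat := j.minFac with hp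
    have hp2 : 2 ≤ p := (Nat.minFac_prime (n := j) (by omega)).two_le
    have hpd : p ∣ j := Nat.minFac_dvd j
    have hple : p ≤ j := Nat.le_of_dvd (by omega) hpd
    have hq1 : 1 ≤ j / p := (Nat.one_le_div_iff (by omega)).mpr hple
    have hqle : j / p ≤ m + 1 := by
      have h2 : j / p ≤ j / 2 := Nat.div_le_div_left hp2 (by omega)
      omega
    rw [pvInnerA_eq ((j : Nat) : Int) (by exact_mod_cast hj2) ((j : Int) - 2).toNat 2 dpm
      (by omega) (by norm_num) (by exact_mod_cast hj2) (by intro e he hel; omega)]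
    simp only [Int.toNat_natCast]
    rw [PySem.List.pySetD_of_nonneg _ _ (by positivity), Int.toNat_natCast]
    rw [PySem.List.pyGetD_of_nonneg _ _ (by positivity), Int.toNat_natCast]
    rw [PySem.List.pyGetD_of_nonneg _ _ (by positivity), Int.toNat_natCast]
    have hget_j : dpm.getD j 0 = n := by
      rw [ihval j (by omega)]
      unfold dpVal
      rw [if_neg (by omega), if_neg (by omega)]
    have hget_q : dpm.getD (j / p) 0 = (sumPF (j / p) : Int) := by
      rw [ihval (j / p) (by omega)]
      unfold dpVal
      rw [if_neg (by omega), if_pos (by omega)]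
    have hsum : sumPF j = p + sumPF (j / p) := by rw [sumPF, dif_pos hj2]
    have hsumle : sumPF j ≤ j := sumPF_le j
    have hval : min (dpm.getD j 0) (dpm.getD (j / p) 0 + 1 + (p : Int) - 1) = (sumPF j : Int) := by
      rw [hget_j, hget_q]
      have he : (sumPF (j / p) : Int) + 1 + (p : Int) - 1 = ((sumPF j : Nat) : Int) := by
        rw [hsum]; push_cast; ring
      rw [he]
      apply min_eq_right
      have : ((sumPF j : Nat) : Int) ≤ (j : Int) := by exact_mod_cast hsumle
      omega
    rw [hval]
    constructor
    · rw [List.length_set, ihlen]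
    · intro t ht
      rw [List.getD_eq_getElem?_getD, List.getElem?_set]
      by_cases htj : t = j
      · subst htj
        rw [if_pos rfl, if_pos (by rw [ihlen]; omega)]
        unfold dpVal
        rw [if_neg (by omega), if_pos (by omega)]
        rfl
      · rw [if_neg (fun h => htj h.symm)]
        rw [← List.getD_eq_getElem?_getD, ihval t ht]
        unfold dpVal
        split_ifs with h0 h2 h3 <;> try rfl
        all_goals omega

theorem a_eq_sumPF (n : Int) (hn : 1 ≤ n) : minSteps_dp n = (sumPF n.toNat : Int) := by
  unfold minSteps_dp
  have hm : 1 + ((n.toNat - 1 : Nat) : Int) ≤ n := by omega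
  have hrange : (n + 1) = (1 + ((n.toNat - 1 : Nat) : Int)) + 1 := by omega
  obtain ⟨hlen, hval⟩ := outerA n hn (n.toNat - 1) hm
  have h2 : ((1 : Int) + ((n.toNat - 1 : Nat) : Int) + 1).toNat = (n + 1).toNat := by omega
  rw [hrange, h2]
  set dp := (PySem.List.pyRange 2 ((1 + ((n.toNat - 1 : Nat) : Int)) + 1) 1).foldl
      (fun dp i => pvInnerA i dp (PySem.List.pyRange 2 (i + 1) 1))
      (PySem.List.pySetD (List.replicate (n + 1).toNat n) 1 0) with hdp
  simp only [PySem.List.pyGetD, PySem.List.pyGet?, PySem.List.pyIdx?, Int.reduceNeg,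
    Int.neg_nonneg, Int.reduceLE, reduceIte, neg_le_neg_iff, Nat.one_le_cast, neg_neg,
    Int.toNat_one]
  rw [if_pos (by rw [hlen]; omega)]
  simp only [Option.bind_some]
  rw [← List.getD_eq_getElem?_getD, hlen]
  have hidx : (n + 1).toNat - 1 = n.toNat := by omega
  rw [hidx, hval n.toNat (by omega)]
  unfold dpVal
  rw [if_neg (by omega), if_pos (by omega)]

-- ===== VERDICT (by name: the statement is the Claim_ definition above) =====
theorem minSteps_dp_spec : Claim_equal_minSteps_dp := by
  intro n _hdom hpre
  unfold Spec_minSteps_dp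
  rw [a_eq_sumPF n hpre, alt_eq_sumPF n hpre]
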